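-- pv_equiv track=rewrite | github.com/ripoze/Advent_of_Code_2019 | day_12/pyy.py | computestep
-- ===== SOURCE A (Python) =====
-- def computestep(lp,lv):
--     for i in range(4):
--         for j in range(4):
--             if i == j:
--                 continue
--             if lp[i] < lp[j]:
--                 lv[i] += 1
--             elif lp[i] > lp[j]:
--                 lv[i] -= 1
--
--     for i in range(4):
--         lp[i] += lv[i]
--     return lp, lv
-- ===== SOURCE B (Python) =====
-- def computestep(lp, lv):
--     # Sort the four positions once; each moon's velocity delta is
--     # (# strictly greater) - (# strictly less) = 4 - count(x) - 2*rank(x).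
--     srt = sorted(lp[i] for i in range(4))
--     for i in range(4):
--         x = lp[i]
--         lv[i] += 4 - srt.count(x) - 2 * srt.index(x)
--     for i in range(4):
--         lp[i] += lv[i]
--     return lp, lv
-- ===== Notes on version B (the rewrite author's own statement) =====
-- stated objective: alternative
-- what changed: B replaces A's all-pairs nested comparison loop with a single sort of the four positions and a per-moon rank/count formula delta = 4 - count(x) - 2*index(x).
import Mathlib
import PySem

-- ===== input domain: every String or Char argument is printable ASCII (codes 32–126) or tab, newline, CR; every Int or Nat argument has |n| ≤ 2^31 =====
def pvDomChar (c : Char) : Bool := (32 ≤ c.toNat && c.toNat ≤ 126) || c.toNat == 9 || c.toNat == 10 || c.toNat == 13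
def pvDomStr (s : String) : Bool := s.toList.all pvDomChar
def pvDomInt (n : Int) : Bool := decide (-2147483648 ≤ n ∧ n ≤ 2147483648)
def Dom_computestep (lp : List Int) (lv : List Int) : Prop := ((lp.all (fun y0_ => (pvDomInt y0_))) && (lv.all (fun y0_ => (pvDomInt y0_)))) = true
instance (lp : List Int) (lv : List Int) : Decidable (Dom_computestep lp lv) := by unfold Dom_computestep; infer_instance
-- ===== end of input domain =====

-- B replaces A's all-pairs comparison with a sort of the four positions and a rank/count
-- formula per moon (alternative decomposition, no speed claim; n is fixed at 4).
-- Both A and B mutate lp and lv in place in the same way and return the same objects;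
-- the equivalence proved here is about the returned value.

-- ===== PORT A =====
-- Python indexing lp[i]/lv[i] raises IndexError when a list is shorter than 4;
-- those inputs are excluded by Pre_computestep, so the default 0 is never observed.
def pvInnerA (lp : List Int) (i : Int) (lv : List Int) (j : Int) : List Int :=
  if i == j then lv
  else if PySem.List.pyGetD lp i 0 < PySem.List.pyGetD lp j 0 then
    lv.set i.toNat (PySem.List.pyGetD lv i 0 + 1)
  else if PySem.List.pyGetD lp j 0 < PySem.List.pyGetD lp i 0 then
    lv.set i.toNat (PySem.List.pyGetD lv i 0 - 1)
  else lv

def computestep (lp : List Int) (lv : List Int) : List Int × List Int :=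
  let lv' := (PySem.List.pyRange 0 4 1).foldl
    (fun lv i => (PySem.List.pyRange 0 4 1).foldl (pvInnerA lp i) lv) lv
  let lp' := (PySem.List.pyRange 0 4 1).foldl
    (fun lp i => lp.set i.toNat (PySem.List.pyGetD lp i 0 + PySem.List.pyGetD lv' i 0)) lp
  (lp', lv')

-- ===== PORT B =====
-- srt.index(x) never raises in Source B because x is one of the four sorted values;
-- the .getD 0 is therefore never observed inside Pre_computestep.
def computestep_alt (lp : List Int) (lv : List Int) : List Int × List Int :=
  let srt := PySem.List.sorted ((PySem.List.pyRange 0 4 1).map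
      (fun i => PySem.List.pyGetD lp i 0)) (fun y => y) false
  let lv' := (PySem.List.pyRange 0 4 1).foldl
    (fun lv i =>
      let x := PySem.List.pyGetD lp i 0
      lv.set i.toNat (PySem.List.pyGetD lv i 0 +
        (4 - (srt.count x : Int) - 2 * (((PySem.List.index? srt x).getD 0 : Nat) : Int)))) lv
  let lp' := (PySem.List.pyRange 0 4 1).foldl
    (fun lp i => lp.set i.toNat (PySem.List.pyGetD lp i 0 + PySem.List.pyGetD lv' i 0)) lp
  (lp', lv')

-- ===== PRECONDITION & SPEC =====
-- Pre_: A raises IndexError (lp[i] or lv[i] with i in range(4)) when either list has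
-- fewer than 4 elements; exactly those inputs are excluded.
def Pre_computestep (lp : List Int) (lv : List Int) : Prop :=
  4 ≤ lp.length ∧ 4 ≤ lv.length
instance (lp : List Int) (lv : List Int) : Decidable (Pre_computestep lp lv) := by
  unfold Pre_computestep; infer_instance

def pvWitness_computestep : List Int × List Int := ([3, -1, 0, 3], [1, 2, -3, 4])

def Spec_computestep (lp : List Int) (lv : List Int) (out : List Int × List Int) : Prop := out = computestep_alt lp lv
instance (lp : List Int) (lv : List Int) (out : List Int × List Int) : Decidable (Spec_computestep lp lv out) := by unfold Spec_computestep; infer_instance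

-- ===== CLAIM (what is proved, stated in full; the proofs are below) =====
def Claim_equal_computestep : Prop := ∀ (lp : List Int) (lv : List Int), Dom_computestep lp lv → Pre_computestep lp lv → Spec_computestep lp lv (computestep lp lv)

-- ===== LEMMAS AND PROOFS =====

lemma pyGetD_set_self (lv : List Int) (i : Int) (v : Int) (hi : 0 ≤ i) (hl : i.toNat < lv.length) :
    PySem.List.pyGetD (lv.set i.toNat v) i 0 = v := by
  rw [PySem.List.pyGetD_eq_getElem _ 0 hi (by simp; omega)]
  simp

-- The inner row of A only updates index i: it equals one set of the accumulated ±1 sum.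
lemma row_fold (lp : List Int) (i : Int) (l : List Int) (lv : List Int)
    (hi : 0 ≤ i) (hlen : i.toNat < lv.length) :
    l.foldl (pvInnerA lp i) lv
      = lv.set i.toNat (PySem.List.pyGetD lv i 0 +
          l.foldl (fun acc j => acc +
            (if i == j then 0
             else if PySem.List.pyGetD lp i 0 < PySem.List.pyGetD lp j 0 then 1
             else if PySem.List.pyGetD lp j 0 < PySem.List.pyGetD lp i 0 then -1
             else 0)) 0) := by
  rw [PySem.List.foldl_add]
  induction l generalizing lv with
  | nil =>
      rw [List.foldl_nil, List.map_nil, List.sum_nil,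
        PySem.List.pyGetD_eq_getElem lv 0 hi (by omega)]
      simp [List.set_getElem_self]
  | cons j l ih =>
      simp only [List.foldl_cons, List.map_cons, List.sum_cons]
      by_cases hij : i == j
      · rw [show pvInnerA lp i lv j = lv by simp [pvInnerA, hij]]
        rw [ih lv hlen]
        simp [hij]
      · simp only [pvInnerA, hij, Bool.false_eq_true, if_false]
        by_cases h1 : PySem.List.pyGetD lp i 0 < PySem.List.pyGetD lp j 0
        · rw [if_pos h1, ih (lv.set i.toNat (PySem.List.pyGetD lv i 0 + 1)) (by simpa using hlen),
            pyGetD_set_self lv i _ hi hlen, List.set_set]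
          congr 1
          simp [h1]
          ring
        · rw [if_neg h1]
          by_cases h2 : PySem.List.pyGetD lp j 0 < PySem.List.pyGetD lp i 0
          · rw [if_pos h2, ih (lv.set i.toNat (PySem.List.pyGetD lv i 0 - 1)) (by simpa using hlen),
              pyGetD_set_self lv i _ hi hlen, List.set_set]
            congr 1
            simp [h1, h2]
            ring
          · rw [if_neg h2, ih lv hlen]
            simp [h1, h2]

-- index in a sorted list = number of strictly smaller elements
lemma index?_sorted_eq_countP (s : List Int) (hs : s.Pairwise (· ≤ ·)) (x : Int) (hx : x ∈ s) :
    PySem.List.index? s x = some (s.countP (fun y => decide (y < x))) := by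
  induction s with
  | nil => simp at hx
  | cons h t ih =>
      rw [List.pairwise_cons] at hs
      by_cases he : h = x
      · subst he
        rw [PySem.List.index?_cons_self]
        have h0 : t.countP (fun y => decide (y < h)) = 0 := by
          rw [List.countP_eq_zero]
          intro y hy
          simpa using not_lt.mpr (hs.1 y hy)
        simp [h0]
      · have hxt : x ∈ t := by
          rcases List.mem_cons.mp hx with h' | h'
          · exact absurd h'.symm he
          · exact h'
        rw [PySem.List.index?_cons_of_ne t he, ih hs.2 hxt]
        have hlt : h < x := lt_of_le_of_ne (hs.1 x hxt) he
        simp [hlt, Nat.add_comm]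

lemma trichotomy_count (q : List Int) (x : Int) :
    q.length = q.countP (fun y => decide (y < x)) + q.count x
      + q.countP (fun y => decide (x < y)) := by
  induction q with
  | nil => simp
  | cons a q ih =>
      simp only [List.countP_cons, List.count_cons]
      rcases lt_trichotomy a x with h | h | h
      · simp [h, ne_of_lt h]
        split_ifs <;> omega
      · simp [h]
        omega
      · simp [not_lt_of_gt h, (ne_of_gt h)]
        split_ifs <;> omega

-- the rank/count formula equals (# strictly greater) - (# strictly less)
lemma rank_delta (q : List Int) (x : Int) (hx : x ∈ q) :
    (q.length : Int) - ((PySem.List.sorted q (fun y => y) false).count x : Int)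
      - 2 * (((PySem.List.index? (PySem.List.sorted q (fun y => y) false) x).getD 0 : Nat) : Int)
    = (q.countP (fun y => decide (x < y)) : Int) - (q.countP (fun y => decide (y < x)) : Int) := by
  have hperm : (PySem.List.sorted q (fun y => y) false).Perm q := PySem.List.sorted_perm q _ _
  have hpw : (PySem.List.sorted q (fun y => y) false).Pairwise (· ≤ ·) := by
    simpa using PySem.List.sorted_pairwise q (fun y => y)
  have hxs : x ∈ PySem.List.sorted q (fun y => y) false := by
    rw [PySem.List.mem_sorted]; exact hx
  rw [index?_sorted_eq_countP _ hpw x hxs, Option.getD_some, hperm.count_eq, hperm.countP_eq]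
  have := trichotomy_count q x
  omega


def pvDelta (x y : Int) : Int := if x < y then 1 else if y < x then -1 else 0

def pvD (lp : List Int) (i j : Int) : Int :=
  if i == j then 0 else pvDelta (PySem.List.pyGetD lp i 0) (PySem.List.pyGetD lp j 0)

-- one A-row in unfolded form
lemma rowA (lp : List Int) (i : Int) (lv : List Int) (hi : 0 ≤ i) (hl : i.toNat < lv.length) :
    pvInnerA lp i (pvInnerA lp i (pvInnerA lp i (pvInnerA lp i lv 0) 1) 2) 3
    = lv.set i.toNat (PySem.List.pyGetD lv i 0 +
        (pvD lp i 0 + pvD lp i 1 + pvD lp i 2 + pvD lp i 3)) := by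
  have h := row_fold lp i [0, 1, 2, 3] lv hi hl
  simp only [List.foldl_cons, List.foldl_nil] at h
  rw [h]
  congr 1
  simp only [pvD, pvDelta]
  ring

-- ===== VERDICT (by name: the statement is the Claim_ definition above) =====
set_option maxHeartbeats 2000000 in
theorem computestep_spec : Claim_equal_computestep := by
  intro lp lv _ hpre
  obtain ⟨hlp, hlv⟩ := hpre
  obtain ⟨p0, p1, p2, p3, pr, rfl⟩ : ∃ a b c d r, lp = a :: b :: c :: d :: r := by
    rcases lp with _ | ⟨a, _ | ⟨b, _ | ⟨c, _ | ⟨d, r⟩⟩⟩⟩ <;>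
      first
        | exact ⟨_, _, _, _, _, rfl⟩
        | (exfalso; simp only [List.length_nil, List.length_cons] at hlp; omega)
  obtain ⟨v0, v1, v2, v3, vr, rfl⟩ : ∃ a b c d r, lv = a :: b :: c :: d :: r := by
    rcases lv with _ | ⟨a, _ | ⟨b, _ | ⟨c, _ | ⟨d, r⟩⟩⟩⟩ <;>
      first
        | exact ⟨_, _, _, _, _, rfl⟩
        | (exfalso; simp only [List.length_nil, List.length_cons] at hlv; omega)
  have hr : PySem.List.pyRange 0 4 1 = [0, 1, 2, 3] := by decide
  simp only [Spec_computestep, computestep, computestep_alt, hr]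
  simp only [List.foldl_cons, List.foldl_nil, List.map_cons, List.map_nil]
  rw [rowA _ 0 _ (by norm_num) (by simp), rowA _ 1 _ (by norm_num) (by simp),
    rowA _ 2 _ (by norm_num) (by simp), rowA _ 3 _ (by norm_num) (by simp)]
  simp [pysem, pvD, pvDelta]
  refine ⟨?_, ?_, ?_, ?_⟩ <;>
    [ have k := rank_delta [p0, p1, p2, p3] p0 (by simp);
      have k := rank_delta [p0, p1, p2, p3] p1 (by simp);
      have k := rank_delta [p0, p1, p2, p3] p2 (by simp);
      have k := rank_delta [p0, p1, p2, p3] p3 (by simp)] <;>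
  · simp only [List.countP_cons, List.countP_nil, List.length_cons, List.length_nil,
      PySem.List.index?_eq_idxOf?, decide_eq_true_eq] at k
    push_cast at k ⊢
    split_ifs at k ⊢ <;> omega
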